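-- pv_equiv track=rewrite | github.com/NJiHyeon/Algorithm_Study | 프로그래머스/2/77885. 2개 이하로 다른 비트/2개 이하로 다른 비트.py | solution
-- ===== SOURCE A (Python) =====
-- def solution(numbers) :
--     answer = []
--     for n in numbers :
--         n_list = list('0' + format(n, 'b')) #리스트로 바꾸는 이유는 숫자를 바꿔야 하므로,
--         idx = ''.join(n_list).rfind('0')
--         n_list[idx] = '1'
--
--         if n%2==1 :
--             n_list[idx+1] = '0'
--         answer.append(int(''.join(n_list), 2))
--     return answer
-- ===== SOURCE B (Python) =====
-- def solution(numbers):
--     answer = []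
--     for n in numbers:
--         low = (n + 1) & ~n          # lowest zero bit of n, as a power of two
--         answer.append(n + low - (low >> 1))
--     return answer
-- ===== Notes on version B (the rewrite author's own statement) =====
-- stated objective: idiomatic
-- what changed: Replaces the binary-string round trip (format, list mutation, rfind, int(...,2)) by pure integer bit arithmetic: low = (n+1) & ~n is n's lowest zero bit and n + low - (low >> 1) sets it and clears the bit below in one expression.
-- outside the precondition, e.g. on solution([-1]): A returns [5], B returns [-1]
import Mathlib
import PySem

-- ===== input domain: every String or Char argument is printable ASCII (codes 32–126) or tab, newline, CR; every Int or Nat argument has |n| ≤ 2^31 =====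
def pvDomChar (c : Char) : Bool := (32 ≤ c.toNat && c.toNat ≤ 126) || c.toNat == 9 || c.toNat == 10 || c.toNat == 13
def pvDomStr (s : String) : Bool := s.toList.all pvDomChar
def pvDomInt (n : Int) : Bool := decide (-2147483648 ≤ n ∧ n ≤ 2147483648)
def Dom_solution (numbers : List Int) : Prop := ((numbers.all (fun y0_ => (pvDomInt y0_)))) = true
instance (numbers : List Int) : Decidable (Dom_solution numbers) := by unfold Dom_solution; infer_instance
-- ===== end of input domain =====

-- B replaces A's binary-string round trip (format / list mutation / rfind / int(.,2))
-- by closed-form integer bit arithmetic per element; equivalence is claimed on the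
-- problem's nonnegative domain (Pre_solution).

-- ===== PORT A =====
-- format(m,'b') for m > 0: binary digits, most significant first (exact for m > 0)
def pvBinRec (m : Nat) : List Char :=
  if h : m = 0 then []
  else pvBinRec (m / 2) ++ [if m % 2 = 1 then '1' else '0']
decreasing_by exact Nat.div_lt_self (Nat.pos_of_ne_zero h) (by norm_num)

-- format(n, 'b') (Python prints '0' for zero and a '-'-prefixed magnitude for negatives)
def pvFmtB (n : Int) : List Char :=
  if n < 0 then '-' :: pvBinRec (-n).toNat
  else if n = 0 then ['0']
  else pvBinRec n.toNat

-- ''.join(cs).rfind(c): index of the LAST occurrence of c, -1 if absent (exact)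
def pvRfind (cs : List Char) (c : Char) : Int :=
  match cs with
  | [] => -1
  | x :: xs =>
      let r := pvRfind xs c
      if 0 ≤ r then r + 1 else if x = c then 0 else -1

-- int(''.join(cs), 2): exact when every character is '0' or '1' (always the case on
-- Pre_solution inputs); on other strings Python raises ValueError (outside Pre_solution)
def pvParseBin (cs : List Char) : Int :=
  cs.foldl (fun acc c => 2 * acc + (if c = '1' then 1 else 0)) 0

-- the body of A's loop for one n; idx ≥ 0 always (the list starts with '0'), so
-- Python's plain nonnegative indexing is .toNat here
def pvStepA (n : Int) : Int :=
  let nList := '0' :: pvFmtB n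
  let idx := pvRfind nList '0'
  let l1 := nList.set idx.toNat '1'
  let l2 := if PySem.Int.mod n 2 = 1 then l1.set (idx + 1).toNat '0' else l1
  pvParseBin l2

def solution (numbers : List Int) : List Int :=
  numbers.foldl (fun answer n => answer ++ [pvStepA n]) []

-- ===== PORT B =====
-- the body of B's loop: low = (n+1) & ~n (with ~n = -n-1); n + low - (low >> 1)
def pvStepB (n : Int) : Int :=
  let low := PySem.Int.band (n + 1) (-n - 1)
  n + low - PySem.Int.floordiv low 2

def solution_alt (numbers : List Int) : List Int :=
  numbers.foldl (fun answer n => answer ++ [pvStepB n]) []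

-- ===== PRECONDITION & SPEC =====
-- Pre_ restricts to nonnegative integers, the problem's stated domain: on negative n,
-- format(n,'b') yields a '-'-prefixed string, so A raises ValueError for even negative n
-- and for odd negative n returns an accidental value produced by overwriting the '-' sign.
def Pre_solution (numbers : List Int) : Prop := ∀ n ∈ numbers, 0 ≤ n
instance (numbers : List Int) : Decidable (Pre_solution numbers) := by
  unfold Pre_solution; infer_instance

def pvWitness_solution : List Int := [0, 1, 2, 3, 7, 12]

def Spec_solution (numbers : List Int) (out : List Int) : Prop := out = solution_alt numbers
instance (numbers : List Int) (out : List Int) : Decidable (Spec_solution numbers out) := by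
  unfold Spec_solution; infer_instance

-- ===== CLAIM (what is proved, stated in full; the proofs are below) =====
def Claim_equal_solution : Prop :=
  ∀ (numbers : List Int), Dom_solution numbers → Pre_solution numbers →
    Spec_solution numbers (solution numbers)

-- ===== LEMMAS AND PROOFS =====

-- (2a+1) &&& 2b = 2*(a &&& b): the single bit lemma both evenness facts reduce to
theorem pv_and_mul2 (a b : Nat) : (2*a+1) &&& (2*b) = 2*(a &&& b) := by
  apply Nat.eq_of_testBit_eq
  intro i
  have h1 : (2*a+1)/2 = a := by omega
  have h2 : (2*b)/2 = b := by omega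
  have h3 : (2*(a &&& b))/2 = a &&& b := by omega
  rw [Nat.testBit_and]
  cases i with
  | zero =>
      simp only [Nat.testBit_zero]
      have h0 : (2*a+1) % 2 = 1 := by omega
      have h4 : (2*b) % 2 = 0 := by omega
      have h5 : (2*(a &&& b)) % 2 = 0 := by omega
      simp [h0, h4, h5]
  | succ j =>
      simp only [Nat.testBit_succ, h1, h2, h3, Nat.testBit_and]

-- B's low on a nonnegative argument, as a Nat
def pvLnat (m : Nat) : Nat := (m+1) - ((m+1) &&& m)

theorem pvL_even (m : Nat) (h : m % 2 = 0) : pvLnat m = 1 := by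
  obtain ⟨r, rfl⟩ : ∃ r, m = 2*r := ⟨m/2, by omega⟩
  have := pv_and_mul2 r r
  simp [Nat.and_self] at this
  simp [pvLnat, this]

theorem pvL_odd (m : Nat) : pvLnat (2*m+1) = 2 * pvLnat m := by
  have h : (2*m+1+1) &&& (2*m+1) = 2 * ((m+1) &&& m) := by
    have := pv_and_mul2 m (m+1)
    calc (2*m+1+1) &&& (2*m+1) = (2*m+1) &&& (2*(m+1)) := by
            rw [Nat.and_comm]; ring_nf
      _ = 2 * (m &&& (m+1)) := pv_and_mul2 m (m+1)
      _ = 2 * ((m+1) &&& m) := by rw [Nat.and_comm]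
  have hle : (m+1) &&& m ≤ m+1 := Nat.and_le_left
  simp only [pvLnat, h]
  omega

-- B's per-element value on ↑m, in Nat terms
def pvG (m : Nat) : Int := (m : Int) + (pvLnat m : Int) - ((pvLnat m / 2 : Nat) : Int)

theorem pvStepB_nat (m : Nat) : pvStepB (m : Int) = pvG m := by
  have hb : PySem.Int.band ((m:Int) + 1) (-(m:Int) - 1) = ((pvLnat m : Nat) : Int) := by
    simp [PySem.Int.band, pvLnat]
    omega
  have hfd : PySem.Int.floordiv ((pvLnat m : Nat) : Int) 2 = ((pvLnat m / 2 : Nat) : Int) := by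
    exact_mod_cast PySem.Int.floordiv_natCast (pvLnat m) 2
  simp only [pvStepB, hb, hfd, pvG]

theorem pv_binRec_zero : pvBinRec 0 = [] := by rw [pvBinRec]; simp
theorem pv_binRec_eq (m : Nat) (h : m ≠ 0) :
    pvBinRec m = pvBinRec (m / 2) ++ [if m % 2 = 1 then '1' else '0'] := by
  rw [pvBinRec]; simp [h]

theorem pv_parse_append (xs : List Char) (c : Char) :
    pvParseBin (xs ++ [c]) = 2 * pvParseBin xs + (if c = '1' then 1 else 0) := by
  simp [pvParseBin, List.foldl_append]

theorem pv_parse_append1 (xs : List Char) : pvParseBin (xs ++ ['1']) = 2 * pvParseBin xs + 1 := by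
  rw [pv_parse_append]; norm_num

theorem pv_parse_append0 (xs : List Char) : pvParseBin (xs ++ ['0']) = 2 * pvParseBin xs := by
  rw [pv_parse_append]; simp

theorem pv_parse_binRec (m : Nat) : pvParseBin ('0' :: pvBinRec m) = (m : Int) := by
  induction m using Nat.strong_induction_on with
  | _ m IH =>
    by_cases h : m = 0
    · subst h; simp [pv_binRec_zero, pvParseBin]
    · rw [pv_binRec_eq m h, show ('0' :: (pvBinRec (m/2) ++ [if m % 2 = 1 then '1' else '0']))
          = ('0' :: pvBinRec (m/2)) ++ [if m % 2 = 1 then '1' else '0'] from rfl,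
        pv_parse_append, IH (m/2) (Nat.div_lt_self (Nat.pos_of_ne_zero h) (by norm_num))]
      by_cases hp : m % 2 = 1 <;> simp [hp] <;> omega

theorem pv_rfind_app1 (xs : List Char) : pvRfind (xs ++ ['1']) '0' = pvRfind xs '0' := by
  induction xs with
  | nil => simp [pvRfind]
  | cons x xs ih => simp [pvRfind, ih]

theorem pv_rfind_app0 (xs : List Char) : pvRfind (xs ++ ['0']) '0' = (xs.length : Int) := by
  induction xs with
  | nil => simp [pvRfind]
  | cons x xs ih => simp [pvRfind, ih]

theorem pv_rfind_nonneg (xs : List Char) : 0 ≤ pvRfind ('0' :: xs) '0' := by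
  simp only [pvRfind]
  split_ifs with h <;> omega

theorem pv_rfind_lt (xs : List Char) (c : Char) : pvRfind xs c < (xs.length : Int) := by
  induction xs with
  | nil => simp [pvRfind]
  | cons x xs ih =>
      simp only [pvRfind, List.length_cons]
      split_ifs <;> push_cast <;> omega

-- the central per-element equivalence, by strong induction on the value
theorem pv_step_eq (m : Nat) : pvStepA (m : Int) = pvG m := by
  induction m using Nat.strong_induction_on with
  | _ m IH =>
    by_cases h0 : m = 0
    · subst h0; decide
    by_cases h1 : m = 1
    · subst h1
      have hb1 : pvBinRec 1 = ['1'] := by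
        rw [pv_binRec_eq 1 (by omega), pv_binRec_zero]; rfl
      have hf : pvFmtB ((1:Nat):Int) = ['1'] := by
        rw [pvFmtB, if_neg (by omega), if_neg (by omega)]
        simpa using hb1
      simp only [pvStepA, hf]
      decide
    have hfmt : pvFmtB (m:Int) = pvBinRec m := by
      rw [pvFmtB, if_neg (by omega), if_neg (by exact_mod_cast h0)]
      simp
    have hmodc : PySem.Int.mod (m:Int) 2 = ((m % 2 : Nat) : Int) := by
      exact_mod_cast PySem.Int.mod_natCast m 2
    by_cases hpar : m % 2 = 1
    · -- odd m = 2q+1, q ≥ 1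
      obtain ⟨q, hm⟩ : ∃ q, m = 2*q + 1 := ⟨m/2, by omega⟩
      have hq : m / 2 = q := by omega
      have hq1 : q ≠ 0 := by omega
      have hmod : PySem.Int.mod (m:Int) 2 = 1 := by rw [hmodc, hpar]; rfl
      have hbin : pvBinRec m = pvBinRec q ++ ['1'] := by
        rw [pv_binRec_eq m h0, hq, hpar]; rfl
      have hfq : pvFmtB (q:Int) = pvBinRec q := by
        rw [pvFmtB, if_neg (by omega), if_neg (by exact_mod_cast hq1)]
        simp
      have hmodq : PySem.Int.mod (q:Int) 2 = ((q % 2 : Nat) : Int) := by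
        exact_mod_cast PySem.Int.mod_natCast q 2
      have hnn : 0 ≤ pvRfind ('0' :: pvBinRec q) '0' := pv_rfind_nonneg _
      obtain ⟨i, hiv⟩ : ∃ i : Nat, pvRfind ('0' :: pvBinRec q) '0' = (i : Int) :=
        ⟨(pvRfind ('0' :: pvBinRec q) '0').toNat, by omega⟩
      have hlt : i < ('0' :: pvBinRec q).length := by
        have := pv_rfind_lt ('0' :: pvBinRec q) '0'
        rw [hiv] at this; exact_mod_cast this
      have hcons : ('0' :: (pvBinRec q ++ ['1'])) = ('0' :: pvBinRec q) ++ ['1'] := rfl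
      have htn : ((i : Int)).toNat = i := by omega
      have htn1 : ((i : Int) + 1).toNat = i + 1 := by omega
      by_cases hqpar : q % 2 = 1
      · -- q odd: both writes land inside the prefix; recurse on q
        have hqbin : pvBinRec q = pvBinRec (q/2) ++ ['1'] := by
          rw [pv_binRec_eq q hq1, hqpar]; rfl
        have hrP : pvRfind ('0' :: pvBinRec q) '0'
            = pvRfind ('0' :: pvBinRec (q/2)) '0' := by
          rw [hqbin, show ('0' :: (pvBinRec (q/2) ++ ['1']))
              = ('0' :: pvBinRec (q/2)) ++ ['1'] from rfl, pv_rfind_app1]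
        have hlt2 : i + 1 < ('0' :: pvBinRec q).length := by
          have h' := pv_rfind_lt ('0' :: pvBinRec (q/2)) '0'
          rw [← hrP, hiv] at h'
          have hPlen : ('0' :: pvBinRec q).length
              = ('0' :: pvBinRec (q/2)).length + 1 := by rw [hqbin]; simp
          omega
        have hmodq1 : PySem.Int.mod (q:Int) 2 = 1 := by rw [hmodq, hqpar]; rfl
        have hAq : pvStepA (q:Int)
            = pvParseBin ((('0' :: pvBinRec q).set i '1').set (i+1) '0') := by
          simp only [pvStepA, hfq, hmodq1, hiv, htn, htn1]
          simp only [if_true]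
        have hAm : pvStepA (m:Int)
            = 2 * pvParseBin ((('0' :: pvBinRec q).set i '1').set (i+1) '0') + 1 := by
          simp only [pvStepA, hfmt, hbin, hcons, pv_rfind_app1, hmod, hiv, htn, htn1]
          simp only [if_true]
          rw [List.set_append_left _ _ hlt,
              List.set_append_left _ _ (by simpa using hlt2), pv_parse_append1]
        have hIH := IH q (by omega)
        rw [hAq] at hIH
        rw [hAm, hIH]
        -- pvG recurrence for odd m with odd q
        have hLm : pvLnat m = 2 * pvLnat q := by rw [hm]; exact pvL_odd q
        have hLq : pvLnat q = 2 * pvLnat (q/2) := by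
          have h2 : q = 2*(q/2) + 1 := by omega
          calc pvLnat q = pvLnat (2*(q/2) + 1) := by rw [← h2]
            _ = 2 * pvLnat (q/2) := pvL_odd _
        simp only [pvG, hLm, hLq]
        have e1 : 2 * (2 * pvLnat (q/2)) / 2 = 2 * pvLnat (q/2) := by omega
        have e2 : 2 * pvLnat (q/2) / 2 = pvLnat (q/2) := by omega
        rw [e1, e2]
        push_cast [hm]
        ring
      · -- q even: the written zero is the appended trailing '1'; closed form m+1
        have hq2 : q % 2 = 0 := by omega
        have hqbin : pvBinRec q = pvBinRec (q/2) ++ ['0'] := by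
          rw [pv_binRec_eq q hq1, hq2]; rfl
        have hPQ : ('0' :: pvBinRec q) = ('0' :: pvBinRec (q/2)) ++ ['0'] := by
          rw [hqbin]; rfl
        have hiQ : (i : Int) = (('0' :: pvBinRec (q/2)).length : Int) := by
          rw [← hiv, hPQ, pv_rfind_app0]
        have hiQ' : i = ('0' :: pvBinRec (q/2)).length := by exact_mod_cast hiQ
        have hset1 : ((('0' :: pvBinRec q) ++ ['1']).set i '1')
            = (('0' :: pvBinRec (q/2)) ++ ['1']) ++ ['1'] := by
          rw [List.set_append_left _ _ hlt, hPQ, hiQ']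
          simp [List.set_append_right]
        have hset2 : (((('0' :: pvBinRec (q/2)) ++ ['1']) ++ ['1']).set (i+1) '0')
            = (('0' :: pvBinRec (q/2)) ++ ['1']) ++ ['0'] := by
          have hlen : i + 1 = (('0' :: pvBinRec (q/2)) ++ ['1']).length := by
            rw [hiQ']; simp
          rw [hlen]
          simp [List.set_append_right]
        have hAm : pvStepA (m:Int) = (2*q + 2 : Int) := by
          simp only [pvStepA, hfmt, hbin, hcons, pv_rfind_app1, hmod, hiv, htn, htn1]
          simp only [if_true]
          rw [hset1, hset2, pv_parse_append0, pv_parse_append1, pv_parse_binRec]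
          omega
        rw [hAm]
        have hLm : pvLnat m = 2 := by
          rw [hm, pvL_odd, pvL_even q hq2]
        simp only [pvG, hLm]
        rw [hm]
        push_cast
        omega
    · -- even m ≥ 2: the last '0' is the final character; closed form m+1
      have hp0 : m % 2 = 0 := by omega
      have hmod : PySem.Int.mod (m:Int) 2 = 0 := by rw [hmodc, hp0]; rfl
      have hbin : pvBinRec m = pvBinRec (m/2) ++ ['0'] := by
        rw [pv_binRec_eq m h0, hp0]; rfl
      have hP : ('0' :: pvBinRec m) = ('0' :: pvBinRec (m/2)) ++ ['0'] := by
        rw [hbin]; rfl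
      have hAm : pvStepA (m:Int) = (m : Int) + 1 := by
        simp only [pvStepA, hfmt, hP, pv_rfind_app0, hmod, Int.toNat_natCast]
        rw [if_neg (by norm_num), List.set_append_right _ _ (le_refl _)]
        simp only [Nat.sub_self, List.set_cons_zero]
        rw [pv_parse_append1, pv_parse_binRec]
        omega
      rw [hAm]
      have hLm : pvLnat m = 1 := pvL_even m hp0
      simp [pvG, hLm]

theorem pv_step_eq_int (n : Int) (h : 0 ≤ n) : pvStepA n = pvStepB n := by
  obtain ⟨m, rfl⟩ : ∃ m : Nat, n = (m : Int) := ⟨n.toNat, by omega⟩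
  rw [pv_step_eq, pvStepB_nat]

-- ===== VERDICT (by name: the statement is the Claim_ definition above) =====
theorem solution_spec : Claim_equal_solution := by
  intro numbers _ hpre
  unfold Spec_solution solution solution_alt
  rw [PySem.List.foldl_append_singleton_eq_map, PySem.List.foldl_append_singleton_eq_map]
  exact List.map_congr_left (fun n hn => pv_step_eq_int n (hpre n hn))
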